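-- pv_equiv track=rewrite | github.com/frankiensteinne/100-days-of-coding | day10/exercise.py | rank_teams
-- ===== SOURCE A (Python) =====
-- def rank_teams(teams, points):
--     # 1. Combine and sort
--     team_points = list(zip(teams, points))  # Combine teams and points
--     team_points.sort(key=lambda item: item[1], reverse=True)  # Sort by points
--
--     # 2. Assign ranks
--     ranks = {}
--     rank = 1
--     for team, _ in team_points:
--         ranks[team] = {'points': points[teams.index(team)], 'rank': rank}  # Include original points
--         rank += 1
--
--     return ranks
-- ===== SOURCE B (Python) =====
-- def rank_teams(teams, points):
--     # Selection instead of sort: repeatedly take the first maximum-point pair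
--     # from the remaining list and assign it the next rank.
--     remaining = list(zip(teams, points))
--     ranks = {}
--     rank = 1
--     while remaining:
--         top = max(remaining, key=lambda item: item[1])
--         ranks[top[0]] = {'points': points[teams.index(top[0])], 'rank': rank}
--         remaining.remove(top)
--         rank += 1
--     return ranks
-- ===== Notes on version B (the rewrite author's own statement) =====
-- stated objective: alternative
-- what changed: Replaces the sort-then-iterate pass (stable descending sort, then rank assignment) with a selection loop that repeatedly picks the first maximum-point pair via max(key=...) from the remaining list, assigns the next rank, and removes it.
import Mathlib
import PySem

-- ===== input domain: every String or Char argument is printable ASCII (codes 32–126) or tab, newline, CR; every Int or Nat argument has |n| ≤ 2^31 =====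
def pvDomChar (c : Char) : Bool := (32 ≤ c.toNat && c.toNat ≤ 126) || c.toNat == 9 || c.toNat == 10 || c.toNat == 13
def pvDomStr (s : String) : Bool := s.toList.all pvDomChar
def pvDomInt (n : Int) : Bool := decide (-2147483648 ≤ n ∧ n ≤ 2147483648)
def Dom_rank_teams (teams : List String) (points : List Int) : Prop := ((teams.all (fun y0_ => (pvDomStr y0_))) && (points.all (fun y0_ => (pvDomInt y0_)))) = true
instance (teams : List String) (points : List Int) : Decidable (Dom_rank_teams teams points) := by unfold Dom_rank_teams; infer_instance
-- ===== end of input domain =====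

-- B replaces A's sort-then-iterate with a selection loop (repeated first-max pick and remove);
-- objective: alternative decomposition, same results. B mutates its local copy only.


-- ===== PORT A =====
-- The value expression {'points': points[teams.index(team)], 'rank': rank}, identical in both
-- Pythons.  team always comes from zip(teams, points), so teams.index succeeds and its result
-- is < len(points); the .getD defaults are unreachable and the helper is exact.
def pointsEntry (teams : List String) (points : List Int) (team : String) (rank : Int) :
    List (String × Int) :=
  [("points", PySem.List.pyGetD points (((PySem.List.index? teams team).getD 0 : Nat) : Int) 0),
   ("rank", rank)]

def rank_teams (teams : List String) (points : List Int) : List (String × List (String × Int)) :=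
  let team_points := teams.zip points
  let sorted_tp := PySem.List.sorted team_points (fun item => item.2) true
  let final := sorted_tp.foldl
    (fun (acc : PySem.Dict String (List (String × Int)) × Int) tp =>
      (acc.1.insert tp.1 (pointsEntry teams points tp.1 acc.2), acc.2 + 1))
    (PySem.Dict.empty, 1)
  final.1.items

-- ===== PORT B =====
-- The while-loop of Source B: `while remaining:` + `max(remaining, key=...)` is the match on
-- PySem.List.max? (none exactly when remaining is empty); remaining.remove(top) is remove?
-- (top ∈ remaining, so the .getD [] default is unreachable).
def selLoop (teams : List String) (points : List Int)
    (remaining : List (String × Int)) (ranks : PySem.Dict String (List (String × Int)))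
    (rank : Int) : PySem.Dict String (List (String × Int)) :=
  match h : PySem.List.max? remaining (fun item => item.2) with
  | none => ranks
  | some top =>
      selLoop teams points ((PySem.List.remove? remaining top).getD [])
        (ranks.insert top.1 (pointsEntry teams points top.1 rank)) (rank + 1)
termination_by remaining.length
decreasing_by
  have hm : top ∈ remaining := PySem.List.max?_mem h
  rw [PySem.List.remove?_eq_some_erase remaining top hm]
  have h1 := List.length_erase_of_mem hm
  have h2 : 0 < remaining.length := List.length_pos_of_mem hm
  simp only [Option.getD_some]
  omega

def rank_teams_alt (teams : List String) (points : List Int) : List (String × List (String × Int)) :=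
  (selLoop teams points (teams.zip points) PySem.Dict.empty 1).items

-- ===== PRECONDITION & SPEC =====
def Spec_rank_teams (teams : List String) (points : List Int) (out : List (String × List (String × Int))) : Prop := out = rank_teams_alt teams points
instance (teams : List String) (points : List Int) (out : List (String × List (String × Int))) : Decidable (Spec_rank_teams teams points out) := by unfold Spec_rank_teams; infer_instance

-- ===== CLAIM (what is proved, stated in full; the proofs are below) =====
def Claim_equal_rank_teams : Prop := ∀ (teams : List String) (points : List Int), Dom_rank_teams teams points → Spec_rank_teams teams points (rank_teams teams points)

-- ===== LEMMAS AND PROOFS =====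

lemma max?_append_singleton {α κ : Type} [LinearOrder κ] (l : List α) (x : α) (key : α → κ) :
    PySem.List.max? (l ++ [x]) key =
      match PySem.List.max? l key with
      | none => some x
      | some m => if key m < key x then some x else some m := by
  simp only [PySem.List.max?, List.foldl_append, List.foldl_cons, List.foldl_nil]
  rfl

lemma sorted_rev_append_singleton {α κ : Type} [LT κ] [DecidableLT κ]
    (l : List α) (x : α) (key : α → κ) :
    PySem.List.sorted (l ++ [x]) key true =
      PySem.List.insertBy (fun a b => decide (key b < key a)) x (PySem.List.sorted l key true) := by
  simp only [PySem.List.sorted, List.foldl_append, List.foldl_cons, List.foldl_nil, if_true]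

-- Stable descending sort picks the FIRST maximum as its head; the tail sorts the rest.
lemma sorted_rev_eq_cons_erase {α κ : Type} [LinearOrder κ] [BEq α] [LawfulBEq α]
    (key : α → κ) :
    ∀ (l : List α) (m : α), PySem.List.max? l key = some m →
      PySem.List.sorted l key true = m :: PySem.List.sorted (l.erase m) key true := by
  intro l
  induction l using List.reverseRecOn with
  | nil => intro m h; simp [PySem.List.max?] at h
  | append_singleton l x ih =>
    intro m h
    rw [max?_append_singleton] at h
    cases hl : PySem.List.max? l key with
    | none =>
      have hnil : l = [] := (PySem.List.max?_eq_none_iff l key).mp hl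
      subst hnil
      simp only [hl] at h
      cases h
      simp [PySem.List.sorted, PySem.List.insertBy]
    | some m0 =>
      simp only [hl] at h
      by_cases hc : key m0 < key x
      · rw [if_pos hc] at h
        cases h
        have hx : x ∉ l := by
          intro hmem
          exact absurd (PySem.List.max?_isMax hl x hmem) (not_le.mpr hc)
        rw [List.erase_append_right _ hx, List.erase_cons_head, List.append_nil,
          sorted_rev_append_singleton]
        cases hs : PySem.List.sorted l key true with
        | nil => simp [PySem.List.insertBy]
        | cons y ys =>
          have hy : y ∈ l := by
            rw [← PySem.List.mem_sorted l key true y, hs]; exact List.mem_cons_self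
          have : key y < key x := lt_of_le_of_lt (PySem.List.max?_isMax hl y hy) hc
          simp [PySem.List.insertBy, this]
      · rw [if_neg hc] at h
        cases h
        have hm0 : m ∈ l := PySem.List.max?_mem hl
        rw [List.erase_append_left _ hm0, sorted_rev_append_singleton, ih m hl,
          sorted_rev_append_singleton]
        simp [PySem.List.insertBy, hc]

-- The selection loop performs exactly the assignments of the fold over the sorted list.
lemma selLoop_eq_foldl_sorted (teams : List String) (points : List Int) :
    ∀ (n : Nat) (rem : List (String × Int)), rem.length ≤ n →
      ∀ (d : PySem.Dict String (List (String × Int))) (r : Int),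
        selLoop teams points rem d r =
          ((PySem.List.sorted rem (fun item => item.2) true).foldl
            (fun (acc : PySem.Dict String (List (String × Int)) × Int) tp =>
              (acc.1.insert tp.1 (pointsEntry teams points tp.1 acc.2), acc.2 + 1)) (d, r)).1 := by
  intro n
  induction n with
  | zero =>
    intro rem hlen d r
    have : rem = [] := List.eq_nil_of_length_eq_zero (Nat.le_zero.mp hlen)
    subst this
    rw [selLoop]
    simp [PySem.List.sorted, PySem.List.max?]
  | succ n ih =>
    intro rem hlen d r
    cases hmax : PySem.List.max? rem (fun item => item.2) with
    | none =>
      have : rem = [] := (PySem.List.max?_eq_none_iff _ _).mp hmax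
      subst this
      rw [selLoop]
      simp [PySem.List.sorted, PySem.List.max?]
    | some top =>
      have hmem : top ∈ rem := PySem.List.max?_mem hmax
      rw [sorted_rev_eq_cons_erase _ rem top hmax, List.foldl_cons]
      rw [selLoop]
      split
      · next heq => rw [heq] at hmax; cases hmax
      · next t heq =>
        rw [hmax] at heq
        cases heq
        rw [PySem.List.remove?_eq_some_erase rem top hmem, Option.getD_some]
        have h1 := List.length_erase_of_mem hmem
        have h2 : 0 < rem.length := List.length_pos_of_mem hmem
        exact ih (rem.erase top) (by omega) _ _

-- ===== VERDICT (by name: the statement is the Claim_ definition above) =====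
theorem rank_teams_spec : Claim_equal_rank_teams := by
  intro teams points _
  show rank_teams teams points = rank_teams_alt teams points
  unfold rank_teams rank_teams_alt
  rw [selLoop_eq_foldl_sorted teams points (teams.zip points).length (teams.zip points) le_rfl]
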